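-- pv_equiv track=rewrite | github.com/Louiii/ChatCPR | visualise_run.py | classify_rounds
-- ===== SOURCE A (Python) =====
-- def classify_rounds(timesteps, member_name):
--     """Return (pre_birth, post_death, alive_rounds) for the given member."""
--     alive_flags = [
--         any(a["name"] == member_name for a in ts.get("agents_start", {}).get("alive", []))
--         for ts in timesteps
--     ]
--
--     # Find first and last rounds where the member is alive
--     first_alive = next((i for i, v in enumerate(alive_flags) if v), 0)
--     last_alive = max(
--         (i for i, v in enumerate(alive_flags) if v),
--         default=len(alive_flags) - 1
--     )
--
--     pre_birth = list(range(0, first_alive))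
--     post_death = list(range(last_alive + 1, len(alive_flags)))
--     alive_rounds = list(range(first_alive, last_alive + 1))
--     return pre_birth, post_death, alive_rounds
-- ===== SOURCE B (Python) =====
-- def classify_rounds(timesteps, member_name):
--     """Return (pre_birth, post_death, alive_rounds) for the given member.
--
--     Per-index three-way classification: with a suffix table ("alive at some
--     round >= i") and a running prefix flag ("alive at some round <= i"), each
--     round index is appended directly to the bucket it belongs to; no first/last
--     indices and no range() construction.
--     """
--     flags = [any(a["name"] == member_name
--                  for a in ts.get("agents_start", {}).get("alive", []))
--              for ts in timesteps]
--     n = len(flags)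
--     # suffix[i]: member alive at some round >= i
--     suffix = [False] * (n + 1)
--     for i in range(n - 1, -1, -1):
--         suffix[i] = flags[i] or suffix[i + 1]
--     pre_birth, post_death, alive_rounds = [], [], []
--     seen = False
--     for i, f in enumerate(flags):
--         seen = seen or f
--         if not seen and suffix[i]:
--             pre_birth.append(i)          # strictly before the first alive round
--         elif seen and not suffix[i]:
--             post_death.append(i)         # strictly after the last alive round
--         else:
--             alive_rounds.append(i)       # between (inclusive), or never alive
--     return pre_birth, post_death, alive_rounds
-- ===== Notes on version B (the rewrite author's own statement) =====
-- stated objective: alternative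
-- what changed: Instead of A's find-first/find-max index passes followed by three range() constructions, B classifies every round index directly into one of the three output lists in a single forward pass, using a precomputed suffix table (alive at some round >= i) and a running prefix flag; no first/last indices and no range() calls.
import Mathlib
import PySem

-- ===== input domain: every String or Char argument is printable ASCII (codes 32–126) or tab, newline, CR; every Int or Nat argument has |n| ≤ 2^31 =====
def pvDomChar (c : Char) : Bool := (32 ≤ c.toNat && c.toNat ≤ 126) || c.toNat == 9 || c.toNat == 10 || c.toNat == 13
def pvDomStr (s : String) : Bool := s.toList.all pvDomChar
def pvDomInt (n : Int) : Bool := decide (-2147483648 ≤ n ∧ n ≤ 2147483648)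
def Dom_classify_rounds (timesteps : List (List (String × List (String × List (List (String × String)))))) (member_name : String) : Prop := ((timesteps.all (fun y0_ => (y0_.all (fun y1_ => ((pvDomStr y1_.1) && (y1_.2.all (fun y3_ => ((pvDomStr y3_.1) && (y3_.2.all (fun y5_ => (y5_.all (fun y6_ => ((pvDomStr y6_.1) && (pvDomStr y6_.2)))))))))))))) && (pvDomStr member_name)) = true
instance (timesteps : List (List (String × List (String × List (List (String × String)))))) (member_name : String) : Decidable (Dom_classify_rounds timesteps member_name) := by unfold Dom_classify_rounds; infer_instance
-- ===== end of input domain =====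

-- B classifies each round index directly into one of the three buckets in one pass,
-- using a suffix table ("alive at some round >= i") and a running prefix flag, with no
-- first/last indices and no range() construction; objective: alternative decomposition.

-- ===== PORT A =====
-- shared subexpression of both Pythons: ts.get("agents_start", {}).get("alive", [])
def pvAgents (ts : List (String × List (String × List (List (String × String))))) : List (List (String × String)) :=
  PySem.Dict.getD (PySem.Dict.mk (PySem.Dict.getD (PySem.Dict.mk ts) "agents_start" [])) "alive" []

-- a["name"] == member_name (a["name"] raises KeyError when absent; get? = none there, excluded by Pre_)
def pvMatch (member_name : String) (a : List (String × String)) : Bool :=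
  PySem.Dict.get? (PySem.Dict.mk a) "name" == some member_name

-- any(a["name"] == member_name for a in ts.get("agents_start", {}).get("alive", []))
def pvAlive (member_name : String) (ts : List (String × List (String × List (List (String × String))))) : Bool :=
  (pvAgents ts).any (pvMatch member_name)

def classify_rounds (timesteps : List (List (String × List (String × List (List (String × String)))))) (member_name : String) : List Int × List Int × List Int :=
  let alive_flags := timesteps.map (pvAlive member_name)
  -- next((i for i, v in enumerate(alive_flags) if v), 0)
  let first_alive : Int :=
    (((PySem.List.enumerate alive_flags 0).filter (fun p => p.2)).map (fun p => p.1)).headD 0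
  -- max((i for i, v in enumerate(alive_flags) if v), default=len(alive_flags)-1)
  let last_alive : Int :=
    (PySem.List.max? ((((PySem.List.enumerate alive_flags 0).filter (fun p => p.2)).map (fun p => p.1))) id).getD ((alive_flags.length : Int) - 1)
  (PySem.List.pyRange 0 first_alive 1,
   PySem.List.pyRange (last_alive + 1) (alive_flags.length : Int) 1,
   PySem.List.pyRange first_alive (last_alive + 1) 1)

-- ===== PORT B =====
-- suffix[i] = flags[i] or suffix[i+1], built from the right (Source B's backward loop); length n+1
def pvSuffix : List Bool → List Bool
  | [] => [false]
  | f :: fs => (f || (pvSuffix fs).headD false) :: pvSuffix fs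

-- Source B's forward loop: seen-flag accumulator, appending index i to one of the three buckets
def pvBuckets : List Bool → List Bool → Int → Bool → List Int × List Int × List Int
  | [], _, _, _ => ([], [], [])
  | f :: fs, suf, i, seen =>
    let seen' := seen || f
    let s := suf.headD false
    let r := pvBuckets fs suf.tail (i + 1) seen'
    if !seen' && s then (i :: r.1, r.2.1, r.2.2)
    else if seen' && !s then (r.1, i :: r.2.1, r.2.2)
    else (r.1, r.2.1, i :: r.2.2)

def classify_rounds_alt (timesteps : List (List (String × List (String × List (List (String × String)))))) (member_name : String) : List Int × List Int × List Int :=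
  let flags := timesteps.map (pvAlive member_name)
  pvBuckets flags (pvSuffix flags) 0 false

-- ===== PRECONDITION & SPEC =====
-- Pre_ excludes exactly the inputs where Python A raises KeyError: some timestep's alive list
-- contains an agent without a "name" key that the short-circuiting any() actually reaches
-- (i.e. no earlier agent in that list matched member_name).
def Pre_classify_rounds (timesteps : List (List (String × List (String × List (List (String × String)))))) (member_name : String) : Prop :=
  ∀ t ∈ timesteps, ∀ a ∈ (pvAgents t).takeWhile (fun a => !(pvMatch member_name a)),
    PySem.Dict.contains (PySem.Dict.mk a) "name" = true
instance (timesteps : List (List (String × List (String × List (List (String × String)))))) (member_name : String) : Decidable (Pre_classify_rounds timesteps member_name) := by unfold Pre_classify_rounds; infer_instance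

def pvWitness_classify_rounds : (List (List (String × List (String × List (List (String × String)))))) × String :=
  ([[("agents_start", [("alive", [[("name", "bob")]])])], []], "bob")

def Spec_classify_rounds (timesteps : List (List (String × List (String × List (List (String × String)))))) (member_name : String) (out : List Int × List Int × List Int) : Prop := out = classify_rounds_alt timesteps member_name
instance (timesteps : List (List (String × List (String × List (List (String × String)))))) (member_name : String) (out : List Int × List Int × List Int) : Decidable (Spec_classify_rounds timesteps member_name out) := by unfold Spec_classify_rounds; infer_instance

-- ===== CLAIM =====
def Claim_equal_classify_rounds : Prop := ∀ (timesteps : List (List (String × List (String × List (List (String × String)))))) (member_name : String), Dom_classify_rounds timesteps member_name → Pre_classify_rounds timesteps member_name → Spec_classify_rounds timesteps member_name (classify_rounds timesteps member_name)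

-- ===== LEMMAS AND PROOFS =====

-- index of the first true flag
def pvFirstIdx? : List Bool → Option Nat
  | [] => none
  | true :: _ => some 0
  | false :: fs => (pvFirstIdx? fs).map (· + 1)

-- index of the last true flag
def pvLastIdx? : List Bool → Option Nat
  | [] => none
  | f :: fs =>
    match pvLastIdx? fs with
    | some m => some (m + 1)
    | none => if f then some 0 else none

-- first_alive as Int with A's default 0
def pvF (l : List Bool) : Int := ((pvFirstIdx? l).getD 0 : Nat)
-- last_alive + 1 with A's default len-1, i.e. default len
def pvL (l : List Bool) : Int := match pvLastIdx? l with | some m => (m : Int) + 1 | none => (l.length : Int)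
-- last_alive + 1 with default 0 (used for the seen=true invariant)
def pvLt (l : List Bool) : Int := match pvLastIdx? l with | some m => (m : Int) + 1 | none => 0

theorem pvSuffix_head (l : List Bool) : (pvSuffix l).headD false = l.any (fun b => b) := by
  induction l with
  | nil => simp [pvSuffix]
  | cons f fs ih => rw [pvSuffix, List.headD_cons, ih, List.any_cons]

theorem pvLastIdx?_none_iff (l : List Bool) : pvLastIdx? l = none ↔ l.any (fun b => b) = false := by
  induction l with
  | nil => simp [pvLastIdx?]
  | cons f fs ih =>
    simp only [pvLastIdx?, List.any_cons]
    rcases h : pvLastIdx? fs with _ | m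
    · cases f <;> simp_all
    · simp_all

theorem pvFirstIdx?_none_iff (l : List Bool) : pvFirstIdx? l = none ↔ l.any (fun b => b) = false := by
  induction l with
  | nil => simp [pvFirstIdx?]
  | cons f fs ih => cases f <;> simp_all [pvFirstIdx?]

-- A's generator (i for i, v in enumerate(flags) if v), with a general start offset k
def pvIdxs (l : List Bool) (k : Int) : List Int :=
  ((PySem.List.enumerate l k).filter (fun p => p.2)).map (fun p => p.1)

theorem pvIdxs_cons (f : Bool) (l : List Bool) (k : Int) :
    pvIdxs (f :: l) k = (if f then [k] else []) ++ pvIdxs l (k + 1) := by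
  simp only [pvIdxs, PySem.List.enumerate_cons, List.filter_cons]
  cases f <;> simp

theorem pvIdxs_mem_le (l : List Bool) (k y : Int) (hy : y ∈ pvIdxs l k) : k ≤ y := by
  induction l generalizing k with
  | nil => simp [pvIdxs] at hy
  | cons f l ih =>
    rw [pvIdxs_cons] at hy
    rcases List.mem_append.mp hy with h | h
    · cases f <;> simp_all
    · have := ih (k + 1) h; omega

theorem pvHeadD_idxs (l : List Bool) (k d : Int) :
    (pvIdxs l k).headD d = match pvFirstIdx? l with | some m => k + (m : Int) | none => d := by
  induction l generalizing k with
  | nil => simp [pvIdxs, pvFirstIdx?]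
  | cons f fs ih =>
    rw [pvIdxs_cons]
    cases f with
    | true => simp [pvFirstIdx?]
    | false =>
      rw [if_neg (by simp), List.nil_append, ih (k + 1)]
      simp only [pvFirstIdx?]
      rcases pvFirstIdx? fs with _ | m
      · rfl
      · simp only [Option.map_some]
        push_cast
        ring

theorem pvMax_step (x d : Int) (xs : List Int) (hx : ∀ y ∈ xs, x < y) :
    (PySem.List.max? (x :: xs) id).getD d = (PySem.List.max? xs id).getD x := by
  have h1 : PySem.List.max? (x :: xs) id ≠ none := by
    simp [PySem.List.max?_eq_none_iff]
  rcases hm : PySem.List.max? (x :: xs) id with _ | m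
  · exact absurd hm h1
  have hmem := PySem.List.max?_mem hm
  have hmax := PySem.List.max?_isMax hm
  cases xs with
  | nil =>
    simp only [List.mem_singleton] at hmem
    have hn : PySem.List.max? ([] : List Int) id = none := by
      simp [PySem.List.max?_eq_none_iff]
    simp [hmem, hn]
  | cons a t =>
    have h2 : PySem.List.max? (a :: t) id ≠ none := by
      simp [PySem.List.max?_eq_none_iff]
    rcases hm' : PySem.List.max? (a :: t) id with _ | m'
    · exact absurd hm' h2
    have hmem' := PySem.List.max?_mem hm'
    have hmax' := PySem.List.max?_isMax hm'
    have hle : m ≤ m' := by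
      rcases List.mem_cons.mp hmem with h | h
      · have := hx m' hmem'; omega
      · exact hmax' m h
    have hge : m' ≤ m := hmax m' (List.mem_cons_of_mem _ hmem')
    simp only [Option.getD_some]
    omega

theorem pvMax_idxs (l : List Bool) (k d : Int) :
    (PySem.List.max? (pvIdxs l k) id).getD d
      = match pvLastIdx? l with | some m => k + (m : Int) | none => d := by
  induction l generalizing k d with
  | nil =>
    have : PySem.List.max? (pvIdxs ([] : List Bool) k) id = none := by
      simp [PySem.List.max?_eq_none_iff, pvIdxs]
    simp [this, pvLastIdx?]
  | cons f fs ih =>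
    rw [pvIdxs_cons]
    cases f with
    | false =>
      rw [if_neg (by simp), List.nil_append, ih (k + 1) d]
      simp only [pvLastIdx?]
      rcases pvLastIdx? fs with _ | m
      · rfl
      · push_cast; ring
    | true =>
      rw [if_pos rfl, List.singleton_append]
      rw [pvMax_step k d _ (fun y hy => by have := pvIdxs_mem_le fs (k + 1) y hy; omega)]
      rw [ih (k + 1) k]
      simp only [pvLastIdx?]
      rcases pvLastIdx? fs with _ | m
      · simp
      · push_cast; ring_nf

-- endpoint-congruence helpers for pyRange goals (closed by omega on the endpoints)
theorem pvRangeCongr (a b a' b' : Int) (h1 : a = a') (h2 : b = b') :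
    PySem.List.pyRange a b 1 = PySem.List.pyRange a' b' 1 := by rw [h1, h2]

theorem pvRangeNil (a b : Int) (h : b ≤ a) : PySem.List.pyRange a b 1 = [] :=
  PySem.List.pyRange_one_eq_nil h

theorem pvConsRange (k a b c d : Int) (h : c < d) (hk : k = c) (ha : a = c + 1) (hb : b = d) :
    k :: PySem.List.pyRange a b 1 = PySem.List.pyRange c d 1 := by
  rw [hk, ha, hb, ← PySem.List.pyRange_one_cons h]

-- seen = true invariant: no pre-birth entries, alive up to the last alive flag, post after it
theorem pvBuckets_true (l : List Bool) (k : Int) :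
    pvBuckets l (pvSuffix l) k true
      = ([], PySem.List.pyRange (k + pvLt l) (k + l.length) 1, PySem.List.pyRange k (k + pvLt l) 1) := by
  induction l generalizing k with
  | nil => simp [pvBuckets, pvLt, pvLastIdx?, PySem.List.pyRange_one_eq_nil]
  | cons f fs ih =>
    simp only [pvBuckets, pvSuffix, List.headD_cons, List.tail_cons, Bool.true_or]
    rw [pvSuffix_head, ih (k + 1)]
    rcases hL : pvLastIdx? fs with _ | m
    · have hany : fs.any (fun b => b) = false := (pvLastIdx?_none_iff fs).mp hL
      have hLt : pvLt fs = 0 := by simp [pvLt, hL]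
      have hLt2 : pvLt (f :: fs) = (if f then (1:Int) else 0) := by
        cases f <;> simp [pvLt, pvLastIdx?, hL]
      rw [hany, hLt, hLt2]
      cases f with
      | false =>
        simp only [Bool.not_false, Bool.not_true, Bool.false_or, Bool.or_false, Bool.true_or,
          Bool.or_true, Bool.true_and, Bool.and_true, Bool.false_and, Bool.and_false,
          Bool.or_self, Bool.false_eq_true, Bool.true_eq_false, if_true, if_false,
          List.length_cons, Prod.mk.injEq]
        refine ⟨?_, ?_, ?_⟩
        all_goals first
          | trivial
          | rfl
          | (exact pvRangeCongr _ _ _ _ (by omega) (by omega))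
          | (exact pvRangeNil _ _ (by omega))
          | (exact (pvRangeNil _ _ (by omega)).symm)
          | (exact (pvRangeNil _ _ (by omega)).trans (pvRangeNil _ _ (by omega)).symm)
          | (exact pvConsRange _ _ _ _ _ (by omega) (by omega) (by omega) (by omega))
      | true =>
        simp only [Bool.not_false, Bool.not_true, Bool.false_or, Bool.or_false, Bool.true_or,
          Bool.or_true, Bool.true_and, Bool.and_true, Bool.false_and, Bool.and_false,
          Bool.or_self, Bool.false_eq_true, Bool.true_eq_false, if_true, if_false,
          List.length_cons, Prod.mk.injEq]
        refine ⟨?_, ?_, ?_⟩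
        all_goals first
          | trivial
          | rfl
          | (exact pvRangeCongr _ _ _ _ (by omega) (by omega))
          | (exact pvRangeNil _ _ (by omega))
          | (exact (pvRangeNil _ _ (by omega)).symm)
          | (exact (pvRangeNil _ _ (by omega)).trans (pvRangeNil _ _ (by omega)).symm)
          | (exact pvConsRange _ _ _ _ _ (by omega) (by omega) (by omega) (by omega))
    · have hany : fs.any (fun b => b) = true := by
        by_contra h
        have := (pvLastIdx?_none_iff fs).mpr (by simpa using h)
        simp [this] at hL
      have hLt : pvLt fs = (m : Int) + 1 := by simp [pvLt, hL]
      have hLt2 : pvLt (f :: fs) = (m : Int) + 2 := by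
        cases f <;> simp [pvLt, pvLastIdx?, hL] <;> push_cast <;> ring
      rw [hany, hLt, hLt2]
      simp only [Bool.not_false, Bool.not_true, Bool.false_or, Bool.or_false, Bool.true_or,
          Bool.or_true, Bool.true_and, Bool.and_true, Bool.false_and, Bool.and_false,
          Bool.or_self, Bool.false_eq_true, Bool.true_eq_false, if_true, if_false,
          List.length_cons, Prod.mk.injEq]
      refine ⟨?_, ?_, ?_⟩
      all_goals first
        | trivial
        | rfl
        | (exact pvRangeCongr _ _ _ _ (by omega) (by omega))
        | (exact pvRangeNil _ _ (by omega))
        | (exact (pvRangeNil _ _ (by omega)).symm)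
        | (exact (pvRangeNil _ _ (by omega)).trans (pvRangeNil _ _ (by omega)).symm)
        | (exact pvConsRange _ _ _ _ _ (by omega) (by omega) (by omega) (by omega))

-- seen = false invariant: the three buckets are exactly A's three ranges
theorem pvBuckets_false (l : List Bool) (k : Int) :
    pvBuckets l (pvSuffix l) k false
      = (PySem.List.pyRange k (k + pvF l) 1,
         PySem.List.pyRange (k + pvL l) (k + l.length) 1,
         PySem.List.pyRange (k + pvF l) (k + pvL l) 1) := by
  induction l generalizing k with
  | nil => simp [pvBuckets, pvF, pvL, pvFirstIdx?, pvLastIdx?, PySem.List.pyRange_one_eq_nil]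
  | cons f fs ih =>
    simp only [pvBuckets, pvSuffix, List.headD_cons, List.tail_cons, Bool.false_or]
    rw [pvSuffix_head]
    cases f with
    | true =>
      -- seen' becomes true: this round starts the alive stretch
      rw [pvBuckets_true fs (k + 1)]
      have hF : pvF (true :: fs) = 0 := by simp [pvF, pvFirstIdx?]
      rcases hL : pvLastIdx? fs with _ | m
      · have hany : fs.any (fun b => b) = false := (pvLastIdx?_none_iff fs).mp hL
        have hLt : pvLt fs = 0 := by simp [pvLt, hL]
        have hL2 : pvL (true :: fs) = 1 := by simp [pvL, pvLastIdx?, hL]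
        rw [hany, hLt, hF, hL2]
        simp only [Bool.not_false, Bool.not_true, Bool.false_or, Bool.or_false, Bool.true_or,
          Bool.or_true, Bool.true_and, Bool.and_true, Bool.false_and, Bool.and_false,
          Bool.or_self, Bool.false_eq_true, Bool.true_eq_false, if_true, if_false,
          List.length_cons, Prod.mk.injEq]
        refine ⟨?_, ?_, ?_⟩
        all_goals first
          | trivial
          | rfl
          | (exact pvRangeCongr _ _ _ _ (by omega) (by omega))
          | (exact pvRangeNil _ _ (by omega))
          | (exact (pvRangeNil _ _ (by omega)).symm)
          | (exact (pvRangeNil _ _ (by omega)).trans (pvRangeNil _ _ (by omega)).symm)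
          | (exact pvConsRange _ _ _ _ _ (by omega) (by omega) (by omega) (by omega))
      · have hany : fs.any (fun b => b) = true := by
          by_contra h
          have := (pvLastIdx?_none_iff fs).mpr (by simpa using h)
          simp [this] at hL
        have hLt : pvLt fs = (m : Int) + 1 := by simp [pvLt, hL]
        have hL2 : pvL (true :: fs) = (m : Int) + 2 := by
          simp [pvL, pvLastIdx?, hL]; push_cast; ring
        rw [hany, hLt, hF, hL2]
        simp only [Bool.not_false, Bool.not_true, Bool.false_or, Bool.or_false, Bool.true_or,
          Bool.or_true, Bool.true_and, Bool.and_true, Bool.false_and, Bool.and_false,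
          Bool.or_self, Bool.false_eq_true, Bool.true_eq_false, if_true, if_false,
          List.length_cons, Prod.mk.injEq]
        refine ⟨?_, ?_, ?_⟩
        all_goals first
          | trivial
          | rfl
          | (exact pvRangeCongr _ _ _ _ (by omega) (by omega))
          | (exact pvRangeNil _ _ (by omega))
          | (exact (pvRangeNil _ _ (by omega)).symm)
          | (exact (pvRangeNil _ _ (by omega)).trans (pvRangeNil _ _ (by omega)).symm)
          | (exact pvConsRange _ _ _ _ _ (by omega) (by omega) (by omega) (by omega))
    | false =>
      rcases hany : fs.any (fun b => b) with _ | _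
      · -- member never alive: every round goes to alive_rounds (A's default behaviour)
        rw [ih (k + 1)]
        have hFn : pvFirstIdx? fs = none := (pvFirstIdx?_none_iff fs).mpr hany
        have hLn : pvLastIdx? fs = none := (pvLastIdx?_none_iff fs).mpr hany
        have hF : pvF (false :: fs) = 0 := by simp [pvF, pvFirstIdx?, hFn]
        have hL2 : pvL (false :: fs) = (fs.length : Int) + 1 := by
          simp [pvL, pvLastIdx?, hLn]
        have hFf : pvF fs = 0 := by simp [pvF, hFn]
        have hLf : pvL fs = (fs.length : Int) := by simp [pvL, hLn]
        rw [hF, hL2, hFf, hLf]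
        simp only [Bool.not_false, Bool.not_true, Bool.false_or, Bool.or_false, Bool.true_or,
          Bool.or_true, Bool.true_and, Bool.and_true, Bool.false_and, Bool.and_false,
          Bool.or_self, Bool.false_eq_true, Bool.true_eq_false, if_true, if_false,
          List.length_cons, Prod.mk.injEq]
        refine ⟨?_, ?_, ?_⟩
        all_goals first
          | trivial
          | rfl
          | (exact pvRangeCongr _ _ _ _ (by omega) (by omega))
          | (exact pvRangeNil _ _ (by omega))
          | (exact (pvRangeNil _ _ (by omega)).symm)
          | (exact (pvRangeNil _ _ (by omega)).trans (pvRangeNil _ _ (by omega)).symm)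
          | (exact pvConsRange _ _ _ _ _ (by omega) (by omega) (by omega) (by omega))
      · -- member alive later: this round is pre-birth
        rw [ih (k + 1)]
        obtain ⟨m, hFm⟩ : ∃ m, pvFirstIdx? fs = some m := by
          rcases h : pvFirstIdx? fs with _ | m
          · exact absurd ((pvFirstIdx?_none_iff fs).mp h) (by simp [hany])
          · exact ⟨m, rfl⟩
        obtain ⟨p, hLp⟩ : ∃ p, pvLastIdx? fs = some p := by
          rcases h : pvLastIdx? fs with _ | p
          · exact absurd ((pvLastIdx?_none_iff fs).mp h) (by simp [hany])
          · exact ⟨p, rfl⟩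
        have hF : pvF (false :: fs) = (m : Int) + 1 := by
          simp [pvF, pvFirstIdx?, hFm]
        have hL2 : pvL (false :: fs) = (p : Int) + 2 := by
          simp [pvL, pvLastIdx?, hLp]; push_cast; ring
        have hFf : pvF fs = (m : Int) := by simp [pvF, hFm]
        have hLf : pvL fs = (p : Int) + 1 := by simp [pvL, hLp]
        rw [hF, hL2, hFf, hLf]
        simp only [Bool.not_false, Bool.not_true, Bool.false_or, Bool.or_false, Bool.true_or,
          Bool.or_true, Bool.true_and, Bool.and_true, Bool.false_and, Bool.and_false,
          Bool.or_self, Bool.false_eq_true, Bool.true_eq_false, if_true, if_false,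
          List.length_cons, Prod.mk.injEq]
        refine ⟨?_, ?_, ?_⟩
        all_goals first
          | trivial
          | rfl
          | (exact pvRangeCongr _ _ _ _ (by omega) (by omega))
          | (exact pvRangeNil _ _ (by omega))
          | (exact (pvRangeNil _ _ (by omega)).symm)
          | (exact (pvRangeNil _ _ (by omega)).trans (pvRangeNil _ _ (by omega)).symm)
          | (exact pvConsRange _ _ _ _ _ (by omega) (by omega) (by omega) (by omega))

-- ===== VERDICT =====
theorem classify_rounds_spec : Claim_equal_classify_rounds := by
  intro timesteps member_name _ _
  unfold Spec_classify_rounds classify_rounds classify_rounds_alt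
  set l := timesteps.map (pvAlive member_name) with hl
  have h1 : (pvIdxs l 0).headD 0 = pvF l := by
    rw [pvHeadD_idxs]
    simp only [pvF]
    rcases pvFirstIdx? l with _ | m <;> simp
  have h2 : (PySem.List.max? (pvIdxs l 0) id).getD ((l.length : Int) - 1) + 1 = pvL l := by
    rw [pvMax_idxs]
    simp only [pvL]
    rcases pvLastIdx? l with _ | m <;> simp
  show (_, _, _) = pvBuckets l (pvSuffix l) 0 false
  rw [pvBuckets_false l 0]
  simp only [pvIdxs] at h1 h2
  rw [h1, h2]
  simp only [zero_add]
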